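-- pv_equiv track=rewrite | github.com/Jenny880606/Paper_Classification | TFIDF+Randomforest.py | turn_TASK
-- ===== SOURCE A (Python) =====
-- category = ['theoretical', 'engineering', 'empirical', 'others']
--
-- def turn_TASK(T):
--     TT = [0,0,0,0]
--     num=0
--     for t in T:
--         for c in range(len(category)):
--             if t == category[c]:
--                 TT[c] = c+1
--                 num+=1
--                 break
--     return TT,num
-- ===== SOURCE B (Python) =====
-- category = ['theoretical', 'engineering', 'empirical', 'others']
--
-- def turn_TASK(T):
--     # Build a frequency table once, then loop over the 4 fixed categories.
--     counts = {}
--     for t in T: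
--         counts[t] = counts.get(t, 0) + 1
--     TT = [0, 0, 0, 0]
--     num = 0
--     for c, cat in enumerate(category):
--         if cat in counts:
--             TT[c] = c + 1
--             num += counts[cat]
--     return TT, num
-- ===== Notes on version B (the rewrite author's own statement) =====
-- stated objective: faster
-- what changed: B builds a frequency dictionary over T in one pass and then iterates over the 4 fixed categories (marking presence and summing per-category counts), instead of A's per-element inner scan of the category list.
import Mathlib
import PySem

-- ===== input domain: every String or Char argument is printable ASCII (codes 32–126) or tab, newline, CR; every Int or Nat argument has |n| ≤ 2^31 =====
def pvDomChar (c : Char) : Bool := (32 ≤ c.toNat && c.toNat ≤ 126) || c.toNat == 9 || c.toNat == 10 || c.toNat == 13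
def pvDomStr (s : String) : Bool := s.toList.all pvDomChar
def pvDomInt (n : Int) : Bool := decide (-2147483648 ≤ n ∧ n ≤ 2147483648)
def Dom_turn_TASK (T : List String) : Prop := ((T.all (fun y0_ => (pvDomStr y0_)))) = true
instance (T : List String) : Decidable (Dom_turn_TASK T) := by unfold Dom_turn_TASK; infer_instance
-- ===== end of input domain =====

-- ===== PORT A =====
-- B builds a frequency dictionary once then loops over the 4 fixed categories; A scans the
-- category list for every element of T. Alternative decomposition; return values proved equal.
def pvCategory : List String := ["theoretical", "engineering", "empirical", "others"]

-- inner 'for c in range(len(category)) … break' loop of A, as recursion over the index list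
def pvInnerA (t : String) : List Nat → List Int → Int → List Int × Int
  | [], TT, num => (TT, num)
  | c :: cs, TT, num =>
      if t = pvCategory.getD c "" then (TT.set c ((c : Int) + 1), num + 1)
      else pvInnerA t cs TT num

def turn_TASK (T : List String) : List Int × Int :=
  T.foldl (fun st t => pvInnerA t [0, 1, 2, 3] st.1 st.2) ([0, 0, 0, 0], 0)

-- ===== PORT B =====
def turn_TASK_alt (T : List String) : List Int × Int :=
  let counts := T.foldl (fun (d : PySem.Dict String Int) t => d.insert t (d.getD t 0 + 1))
      PySem.Dict.empty
  (PySem.List.enumerate pvCategory 0).foldl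
    (fun st p =>
      if counts.contains p.2 then (st.1.set p.1.toNat (p.1 + 1), st.2 + counts.getD p.2 0)
      else st)
    ([0, 0, 0, 0], 0)

-- ===== PRECONDITION & SPEC =====
def Spec_turn_TASK (T : List String) (out : List Int × Int) : Prop := out = turn_TASK_alt T
instance (T : List String) (out : List Int × Int) : Decidable (Spec_turn_TASK T out) := by unfold Spec_turn_TASK; infer_instance

-- ===== CLAIM (what is proved, stated in full; the proofs are below) =====
def Claim_equal_turn_TASK : Prop := ∀ (T : List String), Dom_turn_TASK T → Spec_turn_TASK T (turn_TASK T)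

-- ===== LEMMAS AND PROOFS =====
theorem pvA_char (T : List String) : ∀ (a b c d n : Int),
    T.foldl (fun st t => pvInnerA t [0, 1, 2, 3] st.1 st.2) ([a, b, c, d], n) =
      ([if "theoretical" ∈ T then 1 else a, if "engineering" ∈ T then 2 else b,
        if "empirical" ∈ T then 3 else c, if "others" ∈ T then 4 else d],
       n + (T.countP (fun t => decide (t ∈ pvCategory)) : Int)) := by
  induction T with
  | nil => intro a b c d n; simp
  | cons t rest ih =>
      intro a b c d n
      by_cases h0 : t = "theoretical"
      · subst h0
        have hstep : pvInnerA "theoretical" [0, 1, 2, 3] [a, b, c, d] n = ([1, b, c, d], n + 1) := by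
          simp [pvInnerA, pvCategory]
        simp only [List.foldl_cons]
        rw [hstep, ih]
        simp [pvCategory, List.countP_cons]
        try ring
      · by_cases h1 : t = "engineering"
        · subst h1
          have hstep : pvInnerA "engineering" [0, 1, 2, 3] [a, b, c, d] n = ([a, 2, c, d], n + 1) := by
            simp [pvInnerA, pvCategory]
          simp only [List.foldl_cons]
          rw [hstep, ih]
          simp [pvCategory, List.countP_cons]
          try ring
        · by_cases h2 : t = "empirical"
          · subst h2
            have hstep : pvInnerA "empirical" [0, 1, 2, 3] [a, b, c, d] n = ([a, b, 3, d], n + 1) := by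
              simp [pvInnerA, pvCategory]
            simp only [List.foldl_cons]
            rw [hstep, ih]
            simp [pvCategory, List.countP_cons]
            try ring
          · by_cases h3 : t = "others"
            · subst h3
              have hstep : pvInnerA "others" [0, 1, 2, 3] [a, b, c, d] n = ([a, b, c, 4], n + 1) := by
                simp [pvInnerA, pvCategory]
              simp only [List.foldl_cons]
              rw [hstep, ih]
              simp [pvCategory, List.countP_cons]
              try ring
            · have hstep : pvInnerA t [0, 1, 2, 3] [a, b, c, d] n = ([a, b, c, d], n) := by
                simp [pvInnerA, pvCategory, h0, h1, h2, h3]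
              simp only [List.foldl_cons]
              rw [hstep, ih]
              simp [pvCategory, h0, h1, h2, h3, Ne.symm h0, Ne.symm h1, Ne.symm h2, Ne.symm h3,
                  List.countP_cons]

theorem pvCountP_split (T : List String) :
    T.countP (fun t => decide (t ∈ pvCategory)) =
      T.count "theoretical" + T.count "engineering" + T.count "empirical" + T.count "others" := by
  induction T with
  | nil => simp
  | cons t rest ih =>
      by_cases h0 : t = "theoretical"
      · subst h0; simp [pvCategory, List.countP_cons, List.count_cons]; simp [pvCategory] at ih; omega
      · by_cases h1 : t = "engineering"
        · subst h1; simp [pvCategory, List.countP_cons, List.count_cons]; simp [pvCategory] at ih; omega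
        · by_cases h2 : t = "empirical"
          · subst h2; simp [pvCategory, List.countP_cons, List.count_cons]; simp [pvCategory] at ih; omega
          · by_cases h3 : t = "others"
            · subst h3; simp [pvCategory, List.countP_cons, List.count_cons]; simp [pvCategory] at ih; omega
            · simp [pvCategory, h0, h1, h2, h3, List.countP_cons, List.count_cons]
              simpa [pvCategory] using ih

theorem pvB_char (T : List String) :
    turn_TASK_alt T =
      ([if "theoretical" ∈ T then 1 else 0, if "engineering" ∈ T then 2 else 0,
        if "empirical" ∈ T then 3 else 0, if "others" ∈ T then 4 else 0],
       (if "theoretical" ∈ T then (T.count "theoretical" : Int) else 0) +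
       (if "engineering" ∈ T then (T.count "engineering" : Int) else 0) +
       (if "empirical" ∈ T then (T.count "empirical" : Int) else 0) +
       (if "others" ∈ T then (T.count "others" : Int) else 0)) := by
  have he : PySem.List.enumerate pvCategory 0 =
      [(0, "theoretical"), (1, "engineering"), (2, "empirical"), (3, "others")] := by decide
  unfold turn_TASK_alt
  rw [PySem.Dict.foldl_insert_getD_add_one_eq_counter, he]
  simp only [List.foldl_cons, List.foldl_nil, PySem.Dict.contains_counter,
    PySem.Dict.getD_counter, List.contains_iff_mem]
  split_ifs <;> simp [List.set] <;> ring

-- ===== VERDICT (by name: the statement is the Claim_ definition above) =====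
theorem turn_TASK_spec : Claim_equal_turn_TASK := by
  intro T _
  unfold Spec_turn_TASK
  rw [pvB_char]
  show T.foldl _ ([(0:Int),0,0,0], (0:Int)) = _
  rw [pvA_char T 0 0 0 0 0, pvCountP_split]
  have e0 : (if "theoretical" ∈ T then ((T.count "theoretical" : Int)) else 0) = (T.count "theoretical" : Int) := by
    by_cases h : "theoretical" ∈ T
    · simp [h]
    · simp [h, List.count_eq_zero.mpr h]
  have e1 : (if "engineering" ∈ T then ((T.count "engineering" : Int)) else 0) = (T.count "engineering" : Int) := by
    by_cases h : "engineering" ∈ T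
    · simp [h]
    · simp [h, List.count_eq_zero.mpr h]
  have e2 : (if "empirical" ∈ T then ((T.count "empirical" : Int)) else 0) = (T.count "empirical" : Int) := by
    by_cases h : "empirical" ∈ T
    · simp [h]
    · simp [h, List.count_eq_zero.mpr h]
  have e3 : (if "others" ∈ T then ((T.count "others" : Int)) else 0) = (T.count "others" : Int) := by
    by_cases h : "others" ∈ T
    · simp [h]
    · simp [h, List.count_eq_zero.mpr h]
  rw [e0, e1, e2, e3]
  push_cast
  ring_nf
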